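-- pv_equiv track=rewrite | github.com/ThermoSight/transformer-image-manager-3 | automatic-anamoly-detection/scripts/classify_filtered_images_opencv.py | filter_faulty_inside_potential
-- ===== SOURCE A (Python) =====
-- def filter_faulty_inside_potential(boxes, labels):
--     filtered_boxes = []
--     filtered_labels = []
--     for i, (box, label) in enumerate(zip(boxes, labels)):
--         if label == 'Point Overload (Potential)':
--             # Check if any faulty box is inside this potential box
--             keep = True
--             for j, (fbox, flabel) in enumerate(zip(boxes, labels)):
--                 if flabel == 'Point Overload (Faulty)':
--                     # Check if faulty box is inside potential box
--                     x, y, w, h = box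
--                     fx, fy, fw, fh = fbox
--                     if fx >= x and fy >= y and fx+fw <= x+w and fy+fh <= y+h:
--                         keep = False
--                         break
--             if keep:
--                 filtered_boxes.append(box)
--                 filtered_labels.append(label)
--         else:
--             filtered_boxes.append(box)
--             filtered_labels.append(label)
--     return filtered_boxes, filtered_labels
-- ===== SOURCE B (Python) =====
-- def filter_faulty_inside_potential(boxes, labels):
--     # Mark-and-sweep with inverted loop nesting: the OUTER loop runs over the
--     # faulty boxes and marks, in a boolean drop mask parallel to the input,
--     # every potential box that contains that faulty box; a final pass rebuilds
--     # the outputs from the unmarked entries.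
--     pairs = list(zip(boxes, labels))
--     drop = [False] * len(pairs)
--     for fbox, flabel in pairs:
--         if flabel == 'Point Overload (Faulty)':
--             fx, fy, fw, fh = fbox
--             drop = [d or (label == 'Point Overload (Potential)'
--                           and fx >= x and fy >= y
--                           and fx + fw <= x + w and fy + fh <= y + h)
--                     for ((x, y, w, h), label), d in zip(pairs, drop)]
--     filtered_boxes = [box for (box, label), d in zip(pairs, drop) if not d]
--     filtered_labels = [label for (box, label), d in zip(pairs, drop) if not d]
--     return filtered_boxes, filtered_labels
-- ===== Notes on version B (the rewrite author's own statement) =====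
-- stated objective: alternative
-- what changed: Loop nesting is inverted into mark-and-sweep: the outer loop runs over the faulty boxes and marks a boolean drop mask over all boxes (instead of A's per-potential-box inner rescan with a keep flag and break), and the outputs are rebuilt in a final sweep over the mask.
import Mathlib
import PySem

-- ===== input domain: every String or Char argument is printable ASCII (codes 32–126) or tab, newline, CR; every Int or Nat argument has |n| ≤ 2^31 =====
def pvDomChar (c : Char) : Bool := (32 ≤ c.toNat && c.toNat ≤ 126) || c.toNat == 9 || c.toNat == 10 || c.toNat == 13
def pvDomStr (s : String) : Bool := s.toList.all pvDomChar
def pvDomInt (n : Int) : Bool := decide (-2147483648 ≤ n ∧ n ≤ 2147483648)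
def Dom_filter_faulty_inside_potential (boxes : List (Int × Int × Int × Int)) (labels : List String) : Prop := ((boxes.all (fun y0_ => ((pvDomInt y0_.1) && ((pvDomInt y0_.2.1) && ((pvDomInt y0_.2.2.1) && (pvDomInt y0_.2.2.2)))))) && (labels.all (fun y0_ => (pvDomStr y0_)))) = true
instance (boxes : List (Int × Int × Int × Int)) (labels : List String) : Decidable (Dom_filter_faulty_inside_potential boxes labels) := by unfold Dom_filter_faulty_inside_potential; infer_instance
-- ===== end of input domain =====

-- B inverts the loop nesting into mark-and-sweep: the outer loop runs over the faulty boxes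
-- and marks a boolean drop mask over all boxes, then a final sweep rebuilds the outputs;
-- objective: alternative (same cost, different traversal).

-- ===== PORT A =====
-- A's inner loop over zip(boxes, labels): returns the final value of `keep` (break on first hit).
def pvKeepA (pairs : List ((Int × Int × Int × Int) × String)) (box : Int × Int × Int × Int) : Bool :=
  match pairs with
  | [] => true
  | (fbox, flabel) :: rest =>
    if flabel = "Point Overload (Faulty)" then
      if fbox.1 ≥ box.1 ∧ fbox.2.1 ≥ box.2.1 ∧ fbox.1 + fbox.2.2.1 ≤ box.1 + box.2.2.1 ∧
         fbox.2.1 + fbox.2.2.2 ≤ box.2.1 + box.2.2.2 then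
        false
      else pvKeepA rest box
    else pvKeepA rest box

-- A's outer loop; `all` is the full zip list scanned by the inner loop.
def pvLoopA (all : List ((Int × Int × Int × Int) × String)) :
    List ((Int × Int × Int × Int) × String) → (List (Int × Int × Int × Int)) × List String
  | [] => ([], [])
  | (box, label) :: rest =>
    let tail := pvLoopA all rest
    if label = "Point Overload (Potential)" then
      if pvKeepA all box then (box :: tail.1, label :: tail.2) else tail
    else (box :: tail.1, label :: tail.2)

def filter_faulty_inside_potential (boxes : List (Int × Int × Int × Int)) (labels : List String) : (List (Int × Int × Int × Int)) × List String :=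
  let pairs := boxes.zip labels
  pvLoopA pairs pairs

-- ===== PORT B =====
-- B's mark pass for one faulty box f: the comprehension over zip(pairs, drop).
def pvMark (f : Int × Int × Int × Int)
    (pairs : List ((Int × Int × Int × Int) × String)) (drop : List Bool) : List Bool :=
  List.zipWith
    (fun pd d =>
      d || (decide (pd.2 = "Point Overload (Potential)") &&
            decide (f.1 ≥ pd.1.1) && decide (f.2.1 ≥ pd.1.2.1) &&
            decide (f.1 + f.2.2.1 ≤ pd.1.1 + pd.1.2.2.1) &&
            decide (f.2.1 + f.2.2.2 ≤ pd.1.2.1 + pd.1.2.2.2)))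
    pairs drop

-- B's outer loop over the faulty boxes, threading the drop mask.
def pvMaskB (pairs : List ((Int × Int × Int × Int) × String)) : List Bool :=
  pairs.foldl
    (fun drop p => if p.2 = "Point Overload (Faulty)" then pvMark p.1 pairs drop else drop)
    (List.replicate pairs.length false)

def filter_faulty_inside_potential_alt (boxes : List (Int × Int × Int × Int)) (labels : List String) : (List (Int × Int × Int × Int)) × List String :=
  let pairs := boxes.zip labels
  let drop := pvMaskB pairs
  (((pairs.zip drop).filter (fun x => !x.2)).map (fun x => x.1.1),
   ((pairs.zip drop).filter (fun x => !x.2)).map (fun x => x.1.2))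

-- ===== PRECONDITION & SPEC =====
def Spec_filter_faulty_inside_potential (boxes : List (Int × Int × Int × Int)) (labels : List String) (out : (List (Int × Int × Int × Int)) × List String) : Prop := out = filter_faulty_inside_potential_alt boxes labels
instance (boxes : List (Int × Int × Int × Int)) (labels : List String) (out : (List (Int × Int × Int × Int)) × List String) : Decidable (Spec_filter_faulty_inside_potential boxes labels out) := by unfold Spec_filter_faulty_inside_potential; infer_instance

-- ===== CLAIM (what is proved, stated in full; the proofs are below) =====
def Claim_equal_filter_faulty_inside_potential : Prop := ∀ (boxes : List (Int × Int × Int × Int)) (labels : List String), Dom_filter_faulty_inside_potential boxes labels → Spec_filter_faulty_inside_potential boxes labels (filter_faulty_inside_potential boxes labels)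

-- ===== LEMMAS AND PROOFS =====

-- the containment test as one Bool, used only in the proofs
def pvIn (f box : Int × Int × Int × Int) : Bool :=
  decide (f.1 ≥ box.1) && decide (f.2.1 ≥ box.2.1) &&
  decide (f.1 + f.2.2.1 ≤ box.1 + box.2.2.1) && decide (f.2.1 + f.2.2.2 ≤ box.2.1 + box.2.2.2)

-- `any faulty box of L is inside box`
def pvAnyF (L : List ((Int × Int × Int × Int) × String)) (box : Int × Int × Int × Int) : Bool :=
  ((L.filter (fun p => p.2 = "Point Overload (Faulty)")).map Prod.fst).any (fun f => pvIn f box)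

theorem pvKeepA_eq (pairs : List ((Int × Int × Int × Int) × String)) (box : Int × Int × Int × Int) :
    pvKeepA pairs box = !pvAnyF pairs box := by
  induction pairs with
  | nil => rfl
  | cons p rest ih =>
    obtain ⟨fbox, flabel⟩ := p
    simp only [pvKeepA, pvAnyF, List.filter_cons] at *
    by_cases hl : flabel = "Point Overload (Faulty)"
    · simp only [hl, decide_true]
      by_cases hin : fbox.1 ≥ box.1 ∧ fbox.2.1 ≥ box.2.1 ∧
          fbox.1 + fbox.2.2.1 ≤ box.1 + box.2.2.1 ∧ fbox.2.1 + fbox.2.2.2 ≤ box.2.1 + box.2.2.2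
      · have hins : pvIn fbox box = true := by simp [pvIn]; tauto
        simp [hin, hins]
      · have hins : pvIn fbox box = false := by
          simp only [pvIn]
          by_contra h
          simp only [Bool.not_eq_false, Bool.and_eq_true, decide_eq_true_eq] at h
          exact hin ⟨h.1.1.1, h.1.1.2, h.1.2, h.2⟩
        simp [hin, hins, ih]
    · simp [hl, ih]

theorem pvMark_map (f : Int × Int × Int × Int)
    (pairs : List ((Int × Int × Int × Int) × String))
    (g : ((Int × Int × Int × Int) × String) → Bool) :
    pvMark f pairs (pairs.map g) =
      pairs.map (fun p => g p ||
        (decide (p.2 = "Point Overload (Potential)") && pvIn f p.1)) := by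
  induction pairs with
  | nil => rfl
  | cons p rest ih =>
    simp only [pvMark, List.map_cons, List.zipWith_cons_cons] at *
    refine congrArg₂ _ ?_ ih
    simp [pvIn, Bool.and_assoc]

theorem pvFold_spec (pairs : List ((Int × Int × Int × Int) × String))
    (L : List ((Int × Int × Int × Int) × String))
    (g : ((Int × Int × Int × Int) × String) → Bool) :
    L.foldl (fun drop p => if p.2 = "Point Overload (Faulty)" then pvMark p.1 pairs drop else drop)
        (pairs.map g) =
      pairs.map (fun p => g p ||
        (decide (p.2 = "Point Overload (Potential)") && pvAnyF L p.1)) := by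
  induction L generalizing g with
  | nil => simp [pvAnyF]
  | cons q rest ih =>
    simp only [List.foldl_cons]
    by_cases hq : q.2 = "Point Overload (Faulty)"
    · rw [if_pos hq, pvMark_map, ih]
      refine List.map_congr_left ?_
      intro p _
      simp only [pvAnyF, List.filter_cons, hq, decide_true, if_true, List.map_cons, List.any_cons]
      rw [Bool.and_or_distrib_left, Bool.or_assoc]
    · rw [if_neg hq, ih]
      refine List.map_congr_left ?_
      intro p _
      simp [pvAnyF, hq]

theorem pvOut_eq (all : List ((Int × Int × Int × Int) × String))
    (pairs : List ((Int × Int × Int × Int) × String)) :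
    pvLoopA all pairs =
      (((pairs.zip (pairs.map (fun p =>
          decide (p.2 = "Point Overload (Potential)") && pvAnyF all p.1))).filter
            (fun x => !x.2)).map (fun x => x.1.1),
       ((pairs.zip (pairs.map (fun p =>
          decide (p.2 = "Point Overload (Potential)") && pvAnyF all p.1))).filter
            (fun x => !x.2)).map (fun x => x.1.2)) := by
  induction pairs with
  | nil => rfl
  | cons p rest ih =>
    obtain ⟨box, label⟩ := p
    simp only [pvLoopA, List.map_cons, List.zip_cons_cons, List.filter_cons]
    by_cases hl : label = "Point Overload (Potential)"
    · rw [pvKeepA_eq]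
      by_cases ha : pvAnyF all box = true
      · simp [hl, ha, ih]
      · simp only [Bool.not_eq_true] at ha
        simp [hl, ha, ih]
    · simp [hl, ih]

-- ===== VERDICT (by name: the statement is the Claim_ definition above) =====
theorem filter_faulty_inside_potential_spec : Claim_equal_filter_faulty_inside_potential := by
  intro boxes labels _
  show _ = _
  simp only [filter_faulty_inside_potential, filter_faulty_inside_potential_alt, pvMaskB]
  have hrep : List.replicate (boxes.zip labels).length false =
      (boxes.zip labels).map (fun _ => false) := by
    simp
  rw [hrep, pvFold_spec]
  simp only [Bool.false_or]
  exact pvOut_eq _ _
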